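-- pv_equiv track=rewrite | github.com/MrBrantCode/unitest_baseline | mut_generate/mist_train_cf/cf_101053/solution.py | find_min_nonconsecutive_numbers
-- ===== SOURCE A (Python) =====
-- def find_min_nonconsecutive_numbers(numbers, target_sum):
--     non_consecutive_numbers = []
--     previous_number = 0
--     for number in numbers:
--         if number - previous_number > 1:
--             non_consecutive_numbers.append(number)
--             previous_number = number
--             if sum(non_consecutive_numbers) == target_sum:
--                 return len(non_consecutive_numbers)
--     return -1
-- ===== SOURCE B (Python) =====
-- def find_min_nonconsecutive_numbers(numbers, target_sum):
--     # Pass 1: greedy gap>1 selection.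
--     selected = []
--     prev = 0
--     for x in numbers:
--         if x - prev > 1:
--             selected.append(x)
--             prev = x
--     # Pass 2: first 1-based prefix-sum position equal to target_sum.
--     total = 0
--     for i, x in enumerate(selected, 1):
--         total += x
--         if total == target_sum:
--             return i
--     return -1
-- ===== Notes on version B (the rewrite author's own statement) =====
-- stated objective: alternative
-- what changed: B separates selection from the target test: one pass builds the gap>1-selected list, a second pass keeps a running prefix sum and returns the first 1-based position equal to target_sum, instead of A's interleaved loop that recomputes sum(list) at every append.
import Mathlib
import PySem

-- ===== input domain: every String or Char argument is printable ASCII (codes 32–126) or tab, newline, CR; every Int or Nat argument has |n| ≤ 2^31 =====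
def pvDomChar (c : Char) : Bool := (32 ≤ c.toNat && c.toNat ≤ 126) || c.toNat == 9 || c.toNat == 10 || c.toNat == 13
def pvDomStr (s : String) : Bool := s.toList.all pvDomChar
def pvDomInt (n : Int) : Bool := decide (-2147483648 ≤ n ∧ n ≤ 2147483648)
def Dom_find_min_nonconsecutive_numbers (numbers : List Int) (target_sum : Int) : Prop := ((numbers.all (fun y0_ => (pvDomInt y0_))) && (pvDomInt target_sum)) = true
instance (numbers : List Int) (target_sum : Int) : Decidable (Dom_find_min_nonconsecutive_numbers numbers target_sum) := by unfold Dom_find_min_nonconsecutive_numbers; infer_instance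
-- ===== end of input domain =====

-- ===== PORT A =====
-- B splits A's interleaved loop into two passes: gap>1 selection, then a running prefix-sum scan.
def pvGoA (target_sum : Int) : List Int → List Int → Int → Int
  | [], _, _ => -1
  | x :: rest, acc, prev =>
    if x - prev > 1 then
      let acc' := acc ++ [x]
      if acc'.sum = target_sum then (acc'.length : Int)
      else pvGoA target_sum rest acc' x
    else pvGoA target_sum rest acc prev

def find_min_nonconsecutive_numbers (numbers : List Int) (target_sum : Int) : Int :=
  pvGoA target_sum numbers [] 0

-- ===== PORT B =====
-- Pass 1: greedy gap>1 selection (prev advances only on a selection).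
def pvSelect : List Int → Int → List Int
  | [], _ => []
  | x :: rest, prev => if x - prev > 1 then x :: pvSelect rest x else pvSelect rest prev

-- Pass 2: running prefix sum; first 1-based position equal to target.
def pvScan (target_sum : Int) : List Int → Int → Int → Int
  | [], _, _ => -1
  | x :: rest, total, i =>
    let t := total + x
    if t = target_sum then i else pvScan target_sum rest t (i + 1)

def find_min_nonconsecutive_numbers_alt (numbers : List Int) (target_sum : Int) : Int :=
  pvScan target_sum (pvSelect numbers 0) 0 1

-- ===== PRECONDITION & SPEC =====
def Spec_find_min_nonconsecutive_numbers (numbers : List Int) (target_sum : Int) (out : Int) : Prop := out = find_min_nonconsecutive_numbers_alt numbers target_sum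
instance (numbers : List Int) (target_sum : Int) (out : Int) : Decidable (Spec_find_min_nonconsecutive_numbers numbers target_sum out) := by unfold Spec_find_min_nonconsecutive_numbers; infer_instance

-- ===== CLAIM =====
def Claim_equal_find_min_nonconsecutive_numbers : Prop := ∀ (numbers : List Int) (target_sum : Int), Dom_find_min_nonconsecutive_numbers numbers target_sum → Spec_find_min_nonconsecutive_numbers numbers target_sum (find_min_nonconsecutive_numbers numbers target_sum)

-- ===== LEMMAS AND PROOFS =====
theorem pvGoA_eq_scan (target_sum : Int) (rest : List Int) :
    ∀ (acc : List Int) (prev : Int),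
      pvGoA target_sum rest acc prev
        = pvScan target_sum (pvSelect rest prev) acc.sum ((acc.length : Int) + 1) := by
  induction rest with
  | nil => intro acc prev; simp [pvGoA, pvSelect, pvScan]
  | cons x rest ih =>
    intro acc prev
    by_cases h : x - prev > 1
    · simp only [pvGoA, pvSelect, h, if_pos]
      by_cases hs : (acc ++ [x]).sum = target_sum
      · have hs' : acc.sum + x = target_sum := by simpa using hs
        simp [pvScan, hs, hs']
      · have hs' : ¬ acc.sum + x = target_sum := by simpa using hs
        rw [if_neg hs, ih (acc ++ [x]) x]
        simp [pvScan, hs']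
    · simp [pvGoA, pvSelect, h, ih acc prev]

-- ===== VERDICT =====
theorem find_min_nonconsecutive_numbers_spec : Claim_equal_find_min_nonconsecutive_numbers := by
  intro numbers target_sum _
  unfold Spec_find_min_nonconsecutive_numbers find_min_nonconsecutive_numbers find_min_nonconsecutive_numbers_alt
  simpa using pvGoA_eq_scan target_sum numbers [] 0
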